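-- pv_equiv track=rewrite | github.com/lesleslie/crackerjack | crackerjack/crackerjack.py | _remove_verbose_sections
-- ===== SOURCE A (Python) =====
-- def _remove_verbose_sections(content: str) -> str:
--     sections_to_compress = [
--         "## Recent Bug Fixes and Improvements",
--         "## Development Memories",
--         "## Self-Maintenance Protocol for AI Assistants",
--         "## Pre-commit Hook Maintenance",
--     ]
--     lines = content.split("\n")
--     result = []
--     skip_section = False
--     for line in lines:
--         if any(line.startswith(section) for section in sections_to_compress):
--             skip_section = True
--             result.extend(
--                 (line, "*[Detailed information available in full CLAUDE.md]*")
--             )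
--             result.append("")
--         elif line.startswith("## ") and skip_section:
--             skip_section = False
--             result.append(line)
--         elif not skip_section:
--             result.append(line)
--
--     return "\n".join(result)
-- ===== SOURCE B (Python) =====
-- def _remove_verbose_sections(content: str) -> str:
--     prefixes = (
--         "## Recent Bug Fixes and Improvements",
--         "## Development Memories",
--         "## Self-Maintenance Protocol for AI Assistants",
--         "## Pre-commit Hook Maintenance",
--     )
--     lines = content.split("\n")
--     out = []
--     i = 0
--     n = len(lines)
--     while i < n:
--         line = lines[i]
--         if line.startswith(prefixes):
--             out += [line, "*[Detailed information available in full CLAUDE.md]*", ""]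
--             i += 1
--             while i < n and not lines[i].startswith("## "):
--                 i += 1
--         else:
--             out.append(line)
--             i += 1
--     return "\n".join(out)
-- ===== Notes on version B (the rewrite author's own statement) =====
-- stated objective: alternative
-- what changed: Replaces A's single scan carrying a skip_section boolean flag with a flag-free index walk that, at a compressable header, emits the three replacement lines and runs an inner skip-ahead loop to the next section-header line.
import Mathlib
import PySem

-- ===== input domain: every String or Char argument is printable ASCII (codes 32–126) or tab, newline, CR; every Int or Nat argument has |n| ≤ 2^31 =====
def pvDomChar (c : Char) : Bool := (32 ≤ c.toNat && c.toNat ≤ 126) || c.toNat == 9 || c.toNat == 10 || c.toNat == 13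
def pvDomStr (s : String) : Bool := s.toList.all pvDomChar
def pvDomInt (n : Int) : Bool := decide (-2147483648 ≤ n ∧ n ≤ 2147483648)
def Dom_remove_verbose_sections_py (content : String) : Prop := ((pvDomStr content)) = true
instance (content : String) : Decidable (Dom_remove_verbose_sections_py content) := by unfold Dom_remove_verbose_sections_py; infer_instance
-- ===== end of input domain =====

-- B replaces A's boolean skip-flag line scan by a single pass that, at a compressable
-- header, skips ahead to the next section-header line (alternative decomposition, same cost).

-- ===== PORT A =====
def pvSections : List String :=
  [ "## Recent Bug Fixes and Improvements"
  , "## Development Memories"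
  , "## Self-Maintenance Protocol for AI Assistants"
  , "## Pre-commit Hook Maintenance" ]

-- the for-loop over lines with state `skip_section`, emitting `result` forward
def pvALoop : List String → Bool → List String
  | [], _ => []
  | l :: ls, skip =>
    if pvSections.any (fun s => PySem.Str.startswith l s) then
      l :: "*[Detailed information available in full CLAUDE.md]*" :: "" :: pvALoop ls true
    else if PySem.Str.startswith l "## " && skip then
      l :: pvALoop ls false
    else if !skip then
      l :: pvALoop ls skip
    else
      pvALoop ls skip

def remove_verbose_sections_py (content : String) : String :=
  PySem.Str.join "\n" (pvALoop ((PySem.Str.split? content "\n").getD []) false)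

-- ===== PORT B =====
-- Source B's while loop: emit lines one by one; at a compressable header emit the
-- three replacement lines and skip forward past non-header lines (the inner while).
def pvBLoop : List String → List String
  | [] => []
  | l :: ls =>
    if pvSections.any (fun s => PySem.Str.startswith l s) then
      l :: "*[Detailed information available in full CLAUDE.md]*" :: ""
        :: pvBLoop (ls.dropWhile (fun x => !PySem.Str.startswith x "## "))
    else
      l :: pvBLoop ls
termination_by ls => ls.length
decreasing_by
  · have := List.length_dropWhile_le (fun x => !PySem.Str.startswith x "## ") ls
    simpa using Nat.lt_succ_of_le this
  · simp

def remove_verbose_sections_py_alt (content : String) : String :=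
  PySem.Str.join "\n" (pvBLoop ((PySem.Str.split? content "\n").getD []))

-- ===== PRECONDITION & SPEC =====
def Spec_remove_verbose_sections_py (content : String) (out : String) : Prop := out = remove_verbose_sections_py_alt content
instance (content : String) (out : String) : Decidable (Spec_remove_verbose_sections_py content out) := by unfold Spec_remove_verbose_sections_py; infer_instance

-- ===== CLAIM (what is proved, stated in full; the proofs are below) =====
def Claim_equal_remove_verbose_sections_py : Prop := ∀ (content : String), Dom_remove_verbose_sections_py content → Spec_remove_verbose_sections_py content (remove_verbose_sections_py content)

-- ===== LEMMAS AND PROOFS =====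

theorem pvBLoop_nil : pvBLoop [] = [] := by
  rw [pvBLoop.eq_def]

theorem pvBLoop_cons (l : String) (ls : List String) :
    pvBLoop (l :: ls) =
      if pvSections.any (fun s => PySem.Str.startswith l s) then
        l :: "*[Detailed information available in full CLAUDE.md]*" :: ""
          :: pvBLoop (ls.dropWhile (fun x => !PySem.Str.startswith x "## "))
      else
        l :: pvBLoop ls := by
  rw [pvBLoop.eq_def]

-- every compressable section title itself starts with "## "
theorem compress_is_header (l : String)
    (h : pvSections.any (fun s => PySem.Str.startswith l s) = true) :
    PySem.Str.startswith l "## " = true := by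
  rw [List.any_eq_true] at h
  obtain ⟨s, hs, hpre⟩ := h
  simp only [PySem.Str.startswith_eq, PySem.Chars.startswith_iff] at hpre ⊢
  refine List.IsPrefix.trans ?_ hpre
  simp only [pvSections, List.mem_cons, List.not_mem_nil, or_false] at hs
  rcases hs with rfl | rfl | rfl | rfl
  · decide
  · decide
  · decide
  · decide

theorem aLoop_eq_bLoop (ls : List String) :
    pvALoop ls false = pvBLoop ls ∧
    pvALoop ls true = pvBLoop (ls.dropWhile (fun x => !PySem.Str.startswith x "## ")) := by
  induction ls with
  | nil => rw [List.dropWhile_nil, pvBLoop_nil]; exact ⟨rfl, rfl⟩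
  | cons l ls ih =>
    obtain ⟨ih1, ih2⟩ := ih
    by_cases hc : pvSections.any (fun s => PySem.Str.startswith l s) = true
    · have hh := compress_is_header l hc
      constructor
      · rw [pvALoop, if_pos hc, pvBLoop_cons, if_pos hc, ih2]
      · rw [pvALoop, if_pos hc, List.dropWhile_cons]
        simp only [hh, Bool.not_true, Bool.false_eq_true, if_false]
        rw [pvBLoop_cons, if_pos hc, ih2]
    · by_cases hh : PySem.Str.startswith l "## " = true
      · constructor
        · rw [pvALoop, if_neg hc, pvBLoop_cons, if_neg hc, ih1]
          simp
        · rw [pvALoop, if_neg hc, List.dropWhile_cons]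
          simp only [hh, Bool.not_true, Bool.false_eq_true, if_false, Bool.and_true, if_true]
          rw [pvBLoop_cons, if_neg hc, ih1]
      · have hh' : PySem.Str.startswith l "## " = false := Bool.eq_false_iff.mpr hh
        constructor
        · rw [pvALoop, if_neg hc, pvBLoop_cons, if_neg hc, ih1]
          simp
        · rw [pvALoop, if_neg hc, List.dropWhile_cons]
          simp only [hh', Bool.not_false, if_true, Bool.false_eq_true, if_false,
            Bool.not_true]
          exact ih2

-- ===== VERDICT (by name: the statement is the Claim_ definition above) =====
theorem remove_verbose_sections_py_spec : Claim_equal_remove_verbose_sections_py := by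
  intro content _
  unfold Spec_remove_verbose_sections_py remove_verbose_sections_py remove_verbose_sections_py_alt
  rw [(aLoop_eq_bLoop ((PySem.Str.split? content "\n").getD [])).1]
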